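-- pv_equiv track=rewrite | github.com/Heeesuu/CT_Algorithm | 프로그래머스/unrated/181879. 길이에 따른 연산/길이에 따른 연산.py | solution
-- ===== SOURCE A (Python) =====
-- def solution(num_list):
--     answer = 0
--
--     for i in range(len(num_list)) :
--         if(len(num_list) >= 11):
--             answer += num_list[i]
--         else:
--             answer = 1
--             for i in range(len(num_list)):
--                 answer *= num_list[i]
--
--     return answer
-- ===== SOURCE B (Python) =====
-- def solution(num_list):
--     if len(num_list) >= 11:
--         return sum(num_list)
--     if not num_list:
--         return 0
--     answer = num_list[0]
--     for x in num_list[1:]: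
--         answer *= x
--     return answer
-- ===== Notes on version B (the rewrite author's own statement) =====
-- stated objective: simpler
-- what changed: B checks the length once up front and does a single pass per branch (built-in sum, or one product fold from the head), instead of A's loop that re-tests the length on every iteration and, in the short-list branch, recomputes the whole product with a nested inner loop each time.
import Mathlib
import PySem

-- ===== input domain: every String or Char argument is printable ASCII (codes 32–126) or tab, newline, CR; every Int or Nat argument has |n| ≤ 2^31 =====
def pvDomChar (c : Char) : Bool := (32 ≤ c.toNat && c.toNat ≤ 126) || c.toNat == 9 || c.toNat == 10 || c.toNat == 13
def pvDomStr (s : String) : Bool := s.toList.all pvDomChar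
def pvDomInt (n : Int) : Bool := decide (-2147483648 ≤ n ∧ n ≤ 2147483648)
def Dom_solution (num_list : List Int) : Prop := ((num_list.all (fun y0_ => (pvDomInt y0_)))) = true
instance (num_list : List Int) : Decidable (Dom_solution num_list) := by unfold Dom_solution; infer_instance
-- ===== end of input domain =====

-- ===== PORT A =====
-- B replaces A's quadratic loop (length test each step, full inner product each step) by one pass per branch.
def solution (num_list : List Int) : Int :=
  (PySem.List.pyRange 0 (num_list.length : Int) 1).foldl
    (fun answer i =>
      if (num_list.length : Int) ≥ 11 then answer + PySem.List.pyGetD num_list i 0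
      else (PySem.List.pyRange 0 (num_list.length : Int) 1).foldl
             (fun a j => a * PySem.List.pyGetD num_list j 0) 1)
    0

-- ===== PORT B =====
def solution_alt (num_list : List Int) : Int :=
  if (num_list.length : Int) ≥ 11 then num_list.foldl (· + ·) 0
  else
    match num_list with
    | [] => 0
    | h :: t => t.foldl (· * ·) h

-- ===== PRECONDITION & SPEC =====
def Spec_solution (num_list : List Int) (out : Int) : Prop := out = solution_alt num_list
instance (num_list : List Int) (out : Int) : Decidable (Spec_solution num_list out) := by unfold Spec_solution; infer_instance

-- ===== CLAIM (what is proved, stated in full; the proofs are below) =====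
def Claim_equal_solution : Prop := ∀ (num_list : List Int), Dom_solution num_list → Spec_solution num_list (solution num_list)

-- ===== LEMMAS AND PROOFS =====

theorem foldl_const {α β : Type} (c : β) (xs : List α) (init : β) :
    xs.foldl (fun _ _ => c) init = if xs = [] then init else c := by
  induction xs generalizing init with
  | nil => simp
  | cons x xs ih => simp [List.foldl, ih]


-- ===== VERDICT (by name: the statement is the Claim_ definition above) =====
theorem solution_spec : Claim_equal_solution := by
  intro num_list _
  unfold Spec_solution solution solution_alt
  rw [show ((num_list.length : Int)) = PySem.List.len num_list from rfl]
  by_cases h : PySem.List.len num_list ≥ 11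
  · simp only [h, if_true]
    exact PySem.List.foldl_pyRange_zero_pyGetD (xs := num_list) (f := (· + ·)) (d := 0) (init := 0)
  · simp only [h, if_false]
    rw [foldl_const]
    rw [PySem.List.foldl_pyRange_zero_pyGetD (xs := num_list) (f := (· * ·)) (d := 0) (init := 1)]
    cases num_list with
    | nil => simp [PySem.List.pyRange_one_eq_nil, PySem.List.len]
    | cons x xs =>
      have hne : PySem.List.pyRange 0 (PySem.List.len (x :: xs)) 1 ≠ [] := by
        rw [PySem.List.pyRange_one_cons (by simp [PySem.List.len])]; simp
      simp only [hne, if_false, List.foldl, one_mul]
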